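-- pv_equiv track=rewrite | github.com/StateFarmInsCodingCompetition/2023-StateFarm-CodingCompetition | python/helpers.py | min_map_alphabetically
-- ===== SOURCE A (Python) =====
-- def min_map_alphabetically(map):
--     keys = list(map.keys())
--     keys.sort()
--     min_key = keys[0]
--     min_value = map[keys[0]]
--     for key in keys:
--         if map[key] < min_value:
--             min_key = key
--             min_value = map[key]
--     return min_key
-- ===== SOURCE B (Python) =====
-- def min_map_alphabetically(map):
--     return min(map.items(), key=lambda kv: (kv[1], kv[0]))[0]
-- ===== Notes on version B (the rewrite author's own statement) =====
-- stated objective: simpler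
-- what changed: Replaces sort-all-keys-then-scan-with-running-minimum by a single min() over the items with lexicographic (value, key) tuple key, whose tie-break equals A's alphabetical order; Pre_ excludes the empty dict, on which A raises IndexError (B raises ValueError).
import Mathlib
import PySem

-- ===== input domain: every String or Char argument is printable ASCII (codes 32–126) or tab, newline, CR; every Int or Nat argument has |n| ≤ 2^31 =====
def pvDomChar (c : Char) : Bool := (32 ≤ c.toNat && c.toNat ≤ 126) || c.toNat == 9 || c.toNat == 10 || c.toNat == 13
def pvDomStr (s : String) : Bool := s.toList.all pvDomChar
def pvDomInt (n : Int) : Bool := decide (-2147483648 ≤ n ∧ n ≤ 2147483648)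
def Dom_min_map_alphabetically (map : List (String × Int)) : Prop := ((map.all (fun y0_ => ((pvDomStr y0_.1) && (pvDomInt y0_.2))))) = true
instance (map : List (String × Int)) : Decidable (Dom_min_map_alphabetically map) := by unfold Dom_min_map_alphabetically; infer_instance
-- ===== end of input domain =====

-- B replaces A's sort-the-keys-then-scan by a single pass: min over the items with the
-- lexicographic (value, key) tuple key, whose tie-break equals A's alphabetical order (simpler).


-- ===== PORT A =====
-- keys = sorted(map.keys()); min_key = keys[0]; min_value = map[keys[0]];
-- scan keys keeping the first key with a strictly smaller value.
def min_map_alphabetically (map : List (String × Int)) : String :=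
  let d := PySem.Dict.ofList map
  let keys := PySem.List.sorted d.keys (fun k => k)
  match keys with
  | [] => ""   -- keys[0] raises IndexError in Python; excluded by Pre_
  | k0 :: _ =>
      (keys.foldl (fun acc k => if d.getD k 0 < acc.2 then (k, d.getD k 0) else acc)
        (k0, d.getD k0 0)).1

-- ===== PORT B =====
-- min(map.items(), key=lambda kv: (kv[1], kv[0]))[0]
def min_map_alphabetically_alt (map : List (String × Int)) : String :=
  let d := PySem.Dict.ofList map
  match PySem.List.min2? d.items (fun kv => kv.2) (fun kv => kv.1) with
  | some kv => kv.1
  | none => ""   -- min() of an empty sequence raises ValueError in Python; excluded by Pre_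

-- ===== PRECONDITION & SPEC =====
-- A raises IndexError on the empty dict (keys[0]); that is the only input it raises on.
def Pre_min_map_alphabetically (map : List (String × Int)) : Prop := map ≠ []
instance (map : List (String × Int)) : Decidable (Pre_min_map_alphabetically map) := by unfold Pre_min_map_alphabetically; infer_instance
def pvWitness_min_map_alphabetically : (List (String × Int)) := [("a", 1), ("b", 0)]

def Spec_min_map_alphabetically (map : List (String × Int)) (out : String) : Prop := out = min_map_alphabetically_alt map
instance (map : List (String × Int)) (out : String) : Decidable (Spec_min_map_alphabetically map out) := by unfold Spec_min_map_alphabetically; infer_instance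

-- ===== CLAIM (what is proved, stated in full; the proofs are below) =====
def Claim_equal_min_map_alphabetically : Prop := ∀ (map : List (String × Int)), Dom_min_map_alphabetically map → Pre_min_map_alphabetically map → Spec_min_map_alphabetically map (min_map_alphabetically map)

-- ===== LEMMAS AND PROOFS =====

-- "(p.2, p.1) ≤ (q.2, q.1) lexicographically": the order both programs minimise over.
def Le2 (p q : String × Int) : Prop := p.2 < q.2 ∨ (p.2 = q.2 ∧ p.1 ≤ q.1)

theorem le2_refl (p : String × Int) : Le2 p p := Or.inr ⟨rfl, le_refl _⟩

theorem le2_trans {p q r : String × Int} (h1 : Le2 p q) (h2 : Le2 q r) : Le2 p r := by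
  rcases h1 with h1 | ⟨h1, h1'⟩ <;> rcases h2 with h2 | ⟨h2, h2'⟩
  · exact Or.inl (lt_trans h1 h2)
  · exact Or.inl (h2 ▸ h1)
  · exact Or.inl (h1 ▸ h2)
  · exact Or.inr ⟨h1.trans h2, le_trans h1' h2'⟩

theorem le2_antisymm {p q : String × Int} (h1 : Le2 p q) (h2 : Le2 q p) : p = q := by
  rcases h1 with h1 | ⟨h1, h1'⟩ <;> rcases h2 with h2 | ⟨h2, h2'⟩
  · exact absurd (lt_trans h1 h2) (lt_irrefl _)
  · exact absurd h1 (h2 ▸ lt_irrefl _)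
  · exact absurd h2 (h1 ▸ lt_irrefl _)
  · exact Prod.ext (le_antisymm h1' h2') h1
theorem minfold_spec (f : String → Int) :
    ∀ (l : List String) (mk : String) (mv : Int),
      (∀ k ∈ l, mk < k) → l.Pairwise (· < ·) →
      (l.foldl (fun acc k => if f k < acc.2 then (k, f k) else acc) (mk, mv)) ∈
          (mk, mv) :: l.map (fun k => (k, f k)) ∧
      ∀ q ∈ (mk, mv) :: l.map (fun k => (k, f k)),
        Le2 (l.foldl (fun acc k => if f k < acc.2 then (k, f k) else acc) (mk, mv)) q := by
  intro l
  induction l with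
  | nil =>
    intro mk mv _ _
    exact ⟨List.mem_cons_self, by
      rintro q hq
      simp only [List.map_nil, List.mem_singleton] at hq
      subst hq; exact le2_refl _⟩
  | cons k t ih =>
    intro mk mv hlt hpw
    simp only [List.foldl_cons, List.map_cons]
    have hk : mk < k := hlt k List.mem_cons_self
    have hpw' : t.Pairwise (· < ·) := hpw.of_cons
    have hkt : ∀ k' ∈ t, k < k' := fun k' hk' => (List.pairwise_cons.mp hpw).1 k' hk'
    by_cases h : f k < mv
    · rw [if_pos h]
      obtain ⟨hmem, hmin⟩ := ih k (f k) hkt hpw'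
      have hle : Le2 (k, f k) (mk, mv) := Or.inl h
      refine ⟨?_, ?_⟩
      · rcases List.mem_cons.mp hmem with h' | h'
        · rw [h']; exact List.mem_cons_of_mem _ List.mem_cons_self
        · exact List.mem_cons_of_mem _ (List.mem_cons_of_mem _ h')
      · intro q hq
        rcases List.mem_cons.mp hq with h' | h'
        · subst h'; exact le2_trans (hmin _ List.mem_cons_self) hle
        · exact hmin q h'
    · rw [if_neg h]
      obtain ⟨hmem, hmin⟩ := ih mk mv (fun k' hk' => lt_trans hk (hkt k' hk')) hpw'
      have hle : Le2 (mk, mv) (k, f k) := by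
        rcases (not_lt.mp h).lt_or_eq with h' | h'
        · exact Or.inl h'
        · exact Or.inr ⟨h', le_of_lt hk⟩
      refine ⟨?_, ?_⟩
      · rcases List.mem_cons.mp hmem with h' | h'
        · rw [h']; exact List.mem_cons_self
        · exact List.mem_cons_of_mem _ (List.mem_cons_of_mem _ h')
      · intro q hq
        rcases List.mem_cons.mp hq with h' | h'
        · subst h'; exact hmin _ List.mem_cons_self
        · rcases List.mem_cons.mp h' with h'' | h''
          · subst h''; exact le2_trans (hmin _ List.mem_cons_self) hle
          · exact hmin q (List.mem_cons_of_mem _ h'')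

theorem min2_head :
    ∀ (ys : List (String × Int)) (y : String × Int),
      ∃ r, PySem.List.min2? (y :: ys) (fun kv => kv.2) (fun kv => kv.1) = some r ∧
        r ∈ y :: ys ∧ ∀ q ∈ y :: ys, Le2 r q := by
  intro ys
  induction ys with
  | nil =>
    intro y
    refine ⟨y, rfl, List.mem_cons_self, ?_⟩
    rintro q hq; rw [List.mem_singleton] at hq; subst hq; exact le2_refl _
  | cons x t ih =>
    intro y
    have hstep :
        PySem.List.min2? (y :: x :: t) (fun kv => kv.2) (fun kv => kv.1)
        = if (decide (x.2 < y.2) || !decide (y.2 < x.2) && decide (x.1 < y.1)) = true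
          then PySem.List.min2? (x :: t) (fun kv => kv.2) (fun kv => kv.1)
          else PySem.List.min2? (y :: t) (fun kv => kv.2) (fun kv => kv.1) := by
      simp only [PySem.List.min2?, List.foldl_cons]
      split_ifs <;> rfl
    by_cases h : (decide (x.2 < y.2) || !decide (y.2 < x.2) && decide (x.1 < y.1)) = true
    · rw [hstep, if_pos h]
      simp only [Bool.or_eq_true, Bool.and_eq_true, Bool.not_eq_true',
        decide_eq_true_eq, decide_eq_false_iff_not] at h
      have hxy : Le2 x y := by
        rcases h with h | ⟨h1, h2⟩
        · exact Or.inl h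
        · rcases (not_lt.mp h1).lt_or_eq with h' | h'
          · exact Or.inl h'
          · exact Or.inr ⟨h', le_of_lt h2⟩
      obtain ⟨r, hr, hmem, hmin⟩ := ih x
      refine ⟨r, hr, ?_, ?_⟩
      · exact List.mem_cons_of_mem _ hmem
      · intro q hq
        rcases List.mem_cons.mp hq with rfl | h'
        · exact le2_trans (hmin _ List.mem_cons_self) hxy
        · exact hmin q h'
    · rw [hstep, if_neg h]
      simp only [Bool.or_eq_true, Bool.and_eq_true, Bool.not_eq_true',
        decide_eq_true_eq, decide_eq_false_iff_not, not_or, not_and, not_lt] at h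
      have hyx : Le2 y x := by
        rcases h.1.lt_or_eq with h' | h'
        · exact Or.inl h'
        · exact Or.inr ⟨h', h.2 (le_of_eq h'.symm)⟩
      obtain ⟨r, hr, hmem, hmin⟩ := ih y
      refine ⟨r, hr, ?_, ?_⟩
      · rcases List.mem_cons.mp hmem with h' | h'
        · exact h' ▸ List.mem_cons_self
        · exact List.mem_cons_of_mem _ (List.mem_cons_of_mem _ h')
      · intro q hq
        rcases List.mem_cons.mp hq with rfl | h'
        · exact hmin _ List.mem_cons_self
        · rcases List.mem_cons.mp h' with rfl | h''
          · exact le2_trans (hmin _ List.mem_cons_self) hyx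
          · exact hmin q (List.mem_cons_of_mem _ h'')

-- ===== VERDICT (by name: the statement is the Claim_ definition above) =====
theorem min_map_alphabetically_spec : Claim_equal_min_map_alphabetically := by
  intro map _ hpre
  simp only [Spec_min_map_alphabetically, min_map_alphabetically, min_map_alphabetically_alt]
  set d := PySem.Dict.ofList map with hd
  have hnd : d.keys.Nodup := by rw [hd]; exact PySem.Dict.nodup_keys_ofList map
  have hitems_keys : d.items = d.keys.map (fun k => (k, d.getD k 0)) :=
    PySem.Dict.items_eq_map_keys d hnd 0
  rcases hks : PySem.List.sorted d.keys (fun k => k) with _ | ⟨k0, rest⟩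
  · -- sorted keys empty: both ports hit their (unreachable under Pre_) fallback
    have hkeys : d.keys = [] := (PySem.List.sorted_eq_nil_iff _ _ _).mp hks
    have hit : d.items = [] := by rw [hitems_keys, hkeys]; rfl
    rw [hit]
    simp [PySem.List.min2?]
  · have hperm : (PySem.List.sorted d.keys (fun k => k)).Perm d.keys :=
      PySem.List.sorted_perm d.keys (fun k => k) false
    have hndks : (PySem.List.sorted d.keys (fun k => k)).Nodup := hperm.nodup_iff.mpr hnd
    have hle : (PySem.List.sorted d.keys (fun k => k)).Pairwise (· ≤ ·) :=
      PySem.List.sorted_pairwise d.keys (fun k => k)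
    have hlt : (PySem.List.sorted d.keys (fun k => k)).Pairwise (· < ·) :=
      (hle.and hndks).imp (fun h => lt_of_le_of_ne h.1 h.2)
    rw [hks] at hperm hndks hle hlt
    have hpwrest : rest.Pairwise (· < ·) := hlt.of_cons
    have hk0 : ∀ k ∈ rest, k0 < k := (List.pairwise_cons.mp hlt).1
    obtain ⟨hmemA, hminA⟩ := minfold_spec (fun k => d.getD k 0) rest k0 (d.getD k0 0) hk0 hpwrest
    -- A's fold over k0 :: rest: the first step compares min_value with itself, a no-op
    have hunroll :
        (k0 :: rest).foldl (fun acc k => if d.getD k 0 < acc.2 then (k, d.getD k 0) else acc)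
          (k0, d.getD k0 0)
        = rest.foldl (fun acc k => if d.getD k 0 < acc.2 then (k, d.getD k 0) else acc)
          (k0, d.getD k0 0) := by
      simp
    -- the two candidate lists are permutations of each other
    have hmapperm : ((k0 :: rest).map (fun k => (k, d.getD k 0))).Perm d.items := by
      rw [hitems_keys]; exact hperm.map _
    have hconsmap : (k0, d.getD k0 0) :: rest.map (fun k => (k, d.getD k 0))
        = (k0 :: rest).map (fun k => (k, d.getD k 0)) := rfl
    rw [hconsmap] at hmemA hminA
    have hitne : d.items ≠ [] := by
      intro h0
      rw [hitems_keys] at h0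
      have hknil : d.keys = [] := List.map_eq_nil_iff.mp h0
      have : PySem.List.sorted d.keys (fun k => k) = [] :=
        (PySem.List.sorted_eq_nil_iff _ _ _).mpr hknil
      rw [hks] at this
      exact List.cons_ne_nil _ _ this
    rcases hit : d.items with _ | ⟨y, ys⟩
    · exact absurd hit hitne
    obtain ⟨rB, hrB, hmemB, hminB⟩ := min2_head ys y
    rw [hrB]
    rw [hit] at hmapperm
    change (List.foldl (fun acc k => if d.getD k 0 < acc.2 then (k, d.getD k 0) else acc)
      (k0, d.getD k0 0) (k0 :: rest)).1 = rB.1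
    have h1 : Le2 (rest.foldl (fun acc k => if d.getD k 0 < acc.2 then (k, d.getD k 0) else acc)
        (k0, d.getD k0 0)) rB := hminA rB (hmapperm.symm.subset hmemB)
    have h2 : Le2 rB (rest.foldl (fun acc k => if d.getD k 0 < acc.2 then (k, d.getD k 0) else acc)
        (k0, d.getD k0 0)) := hminB _ (hmapperm.subset hmemA)
    rw [hunroll, le2_antisymm h1 h2]
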